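-- pv_equiv track=rewrite | github.com/Akhil9325/projects | Code practice/practice.py | count_valid_numbers
-- ===== SOURCE A (Python) =====
-- MOD = 10**9 + 7
--
-- def count_valid_numbers(l, r, k):
--     # We need to consider the length of numbers.
--     count = 0
--     for length in range(l, r + 1):
--         # Calculate the range for numbers with this length
--         start = 10**(length - 1)
--         end = 10**length
--
--         # Iterate over possible digit sums
--         for digit_sum in range(1, 9 * length + 1):
--             if k * digit_sum < 10 * length and (k * digit_sum) % 9 == digit_sum % 9:
--                 count += 1
--
--     return count % MOD
-- ===== SOURCE B (Python) =====
-- MOD = 10**9 + 7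
--
-- def count_valid_numbers(l, r, k):
--     # m = smallest positive s with (k-1)*s divisible by 9 (= 9 // gcd(k-1, 9))
--     if (k - 1) % 9 == 0:
--         m = 1
--     elif (k - 1) % 3 == 0:
--         m = 3
--     else:
--         m = 9
--     total = 0
--     for length in range(max(l, 1), r + 1):
--         if k <= 0:
--             bound = 9 * length
--         else:
--             bound = min(9 * length, (10 * length - 1) // k)
--         total += bound // m
--     return total % MOD
-- ===== Notes on version B (the rewrite author's own statement) =====
-- stated objective: alternative
-- what changed: B replaces A's inner scan over all digit sums by a per-length closed-form count (multiples of 9//gcd(k-1,9) up to min(9*length,(10*length-1)//k)) and skips non-positive lengths, removing the inner loop (O(r-l) iterations instead of O((r-l)*r)).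
import Mathlib
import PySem

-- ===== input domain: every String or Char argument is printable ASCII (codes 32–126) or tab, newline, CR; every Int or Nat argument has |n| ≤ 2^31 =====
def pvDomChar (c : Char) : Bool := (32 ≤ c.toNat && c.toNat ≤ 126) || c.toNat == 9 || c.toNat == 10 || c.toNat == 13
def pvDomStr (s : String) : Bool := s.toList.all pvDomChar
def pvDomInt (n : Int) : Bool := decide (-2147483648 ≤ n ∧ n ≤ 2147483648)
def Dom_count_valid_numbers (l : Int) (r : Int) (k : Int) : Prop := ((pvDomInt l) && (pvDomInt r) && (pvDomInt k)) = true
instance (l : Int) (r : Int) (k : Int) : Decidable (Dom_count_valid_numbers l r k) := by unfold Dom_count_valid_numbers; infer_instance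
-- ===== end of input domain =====

-- B counts the qualifying digit sums per length in closed form (multiples of a step up
-- to a floordiv bound) instead of scanning all digit sums (alternative algorithm).

-- ===== PORT A =====
def count_valid_numbers (l : Int) (r : Int) (k : Int) : Int :=
  let count : Int :=
    (PySem.List.pyRange l (r + 1)).foldl
      (fun count length =>
        -- Python also computes start = 10**(length-1) and end = 10**length here;
        -- both are unused (for length ≤ 0 Python yields a float) and never affect the result.
        (PySem.List.pyRange 1 (9 * length + 1)).foldl
          (fun c digit_sum =>
            if k * digit_sum < 10 * length ∧
               PySem.Int.mod (k * digit_sum) 9 = PySem.Int.mod digit_sum 9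
            then c + 1 else c)
          count)
      0
  PySem.Int.mod count (10 ^ 9 + 7)

-- ===== PORT B =====
def count_valid_numbers_alt (l : Int) (r : Int) (k : Int) : Int :=
  let m : Int :=
    if PySem.Int.mod (k - 1) 9 = 0 then 1
    else if PySem.Int.mod (k - 1) 3 = 0 then 3
    else 9
  let total : Int :=
    (PySem.List.pyRange (max l 1) (r + 1)).foldl
      (fun total length =>
        let bound : Int :=
          if k ≤ 0 then 9 * length
          else min (9 * length) (PySem.Int.floordiv (10 * length - 1) k)
        total + PySem.Int.floordiv bound m)
      0
  PySem.Int.mod total (10 ^ 9 + 7)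

-- ===== PRECONDITION & SPEC =====
def Spec_count_valid_numbers (l : Int) (r : Int) (k : Int) (out : Int) : Prop := out = count_valid_numbers_alt l r k
instance (l : Int) (r : Int) (k : Int) (out : Int) : Decidable (Spec_count_valid_numbers l r k out) := by unfold Spec_count_valid_numbers; infer_instance

-- ===== CLAIM (what is proved, stated in full; the proofs are below) =====
def Claim_equal_count_valid_numbers : Prop := ∀ (l : Int) (r : Int) (k : Int), Dom_count_valid_numbers l r k → Spec_count_valid_numbers l r k (count_valid_numbers l r k)

-- ===== LEMMAS AND PROOFS =====

-- step of the arithmetic progression of qualifying digit sums: 9 / gcd(k-1, 9)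
def pvM (k : Int) : Int := if (9:Int) ∣ (k - 1) then 1 else if (3:Int) ∣ (k - 1) then 3 else 9

-- largest qualifying digit sum for a length L ≥ 1
def pvBound (k L : Int) : Int :=
  if k ≤ 0 then 9 * L else min (9 * L) (PySem.Int.floordiv (10 * L - 1) k)

-- contribution of one length to the count
def pvTerm (k L : Int) : Int :=
  if 1 ≤ L then PySem.Int.floordiv (pvBound k L) (pvM k) else 0

lemma pvM_cases (k : Int) : pvM k = 1 ∨ pvM k = 3 ∨ pvM k = 9 := by
  unfold pvM; split_ifs <;> simp

lemma pvM_pos (k : Int) : 0 < pvM k := by rcases pvM_cases k with h | h | h <;> omega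

lemma pvM_eq (k : Int) :
    (if PySem.Int.mod (k - 1) 9 = 0 then (1:Int)
     else if PySem.Int.mod (k - 1) 3 = 0 then 3 else 9) = pvM k := by
  simp only [PySem.Int.mod_eq_zero_iff_dvd, pvM]

lemma dvd_iff_pvM (k s : Int) : (9:Int) ∣ (k - 1) * s ↔ pvM k ∣ s := by
  unfold pvM; split_ifs with h9 h3
  · exact iff_of_true (h9.mul_right s) (one_dvd s)
  · obtain ⟨v, hv⟩ := h3
    constructor
    · rintro ⟨t, ht⟩
      have h3vs : (3:Int) ∣ v * s := ⟨t, by rw [hv] at ht; linarith⟩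
      have hv3 : ¬ (3:Int) ∣ v := by
        rintro ⟨w, hw⟩; exact h9 ⟨w, by rw [hv, hw]; ring⟩
      exact ((Int.prime_three.dvd_mul).mp h3vs).resolve_left hv3
    · rintro ⟨u, hu⟩; exact ⟨v * u, by rw [hv, hu]; ring⟩
  · constructor
    · intro h
      have h3s : (3:Int) ∣ (k - 1) * s := dvd_trans ⟨3, by norm_num⟩ h
      have hs3 : (3:Int) ∣ s := ((Int.prime_three.dvd_mul).mp h3s).resolve_left h3
      obtain ⟨u, hu⟩ := hs3
      have h3u : (3:Int) ∣ (k - 1) * u := by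
        obtain ⟨t, ht⟩ := h; exact ⟨t, by rw [hu] at ht; linarith⟩
      have hu3 : (3:Int) ∣ u := ((Int.prime_three.dvd_mul).mp h3u).resolve_left h3
      obtain ⟨w, hw⟩ := hu3
      exact ⟨w, by rw [hu, hw]; ring⟩
    · rintro ⟨u, hu⟩; exact ⟨(k - 1) * u, by rw [hu]; ring⟩

lemma bound_range (k L : Int) (hL : 1 ≤ L) : 0 ≤ pvBound k L ∧ pvBound k L ≤ 9 * L := by
  unfold pvBound; split_ifs with hk
  · omega
  · have h0 : (0:Int) ≤ PySem.Int.floordiv (10 * L - 1) k :=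
      (PySem.Int.le_floordiv_iff_mul_le (by omega)).mpr (by omega)
    omega

lemma pred_iff (k L s : Int) (hL : 1 ≤ L) (hs1 : 1 ≤ s) (hs2 : s ≤ 9 * L) :
    (k * s < 10 * L ∧ PySem.Int.mod (k * s) 9 = PySem.Int.mod s 9)
      ↔ (pvM k ∣ s ∧ s ≤ pvBound k L) := by
  have hmod : (PySem.Int.mod (k * s) 9 = PySem.Int.mod s 9) ↔ pvM k ∣ s := by
    rw [PySem.Int.mod_eq_emod_of_pos (by norm_num), PySem.Int.mod_eq_emod_of_pos (by norm_num),
        ← dvd_iff_pvM]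
    show Int.ModEq 9 (k * s) s ↔ _
    rw [Int.modEq_iff_dvd, show s - k * s = -((k - 1) * s) by ring, dvd_neg]
  unfold pvBound
  split_ifs with hk
  · have hks : k * s ≤ 0 := mul_nonpos_of_nonpos_of_nonneg hk (by omega)
    constructor
    · rintro ⟨_, hd⟩; exact ⟨hmod.mp hd, hs2⟩
    · rintro ⟨hd, _⟩; exact ⟨by omega, hmod.mpr hd⟩
  · have hfd : s ≤ PySem.Int.floordiv (10 * L - 1) k ↔ s * k ≤ 10 * L - 1 :=
      PySem.Int.le_floordiv_iff_mul_le (by omega)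
    have hsk : s * k = k * s := mul_comm s k
    constructor
    · rintro ⟨hlt, hd⟩
      exact ⟨hmod.mp hd, le_min hs2 (hfd.mpr (by omega))⟩
    · rintro ⟨hd, hle⟩
      have := hfd.mp (le_trans hle (min_le_right _ _))
      exact ⟨by omega, hmod.mpr hd⟩

lemma count_mult (m B : Int) (hm : m = 1 ∨ m = 3 ∨ m = 9) (n : Nat) :
    ((List.countP (fun s => decide (m ∣ s ∧ s ≤ B))
        ((List.range n).map (fun j : Nat => (1:Int) + (j:Int)))) : Int)
      = min (n : Int) (max B 0) / m := by
  induction n with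
  | zero =>
    simp only [List.range_zero, List.map_nil, List.countP_nil, Nat.cast_zero]
    rcases hm with h | h | h <;> subst h <;> omega
  | succ n ih =>
    rw [List.range_succ, List.map_append, List.countP_append]
    simp only [List.map_cons, List.map_nil, List.countP_cons, List.countP_nil,
      decide_eq_true_eq, Nat.cast_add, ih]
    rcases hm with h | h | h <;> subst h <;> split_ifs with hif <;>
      push_cast <;> omega

lemma inner_eq (k L c : Int) :
    (PySem.List.pyRange 1 (9 * L + 1)).foldl
      (fun c digit_sum =>
        if k * digit_sum < 10 * L ∧
           PySem.Int.mod (k * digit_sum) 9 = PySem.Int.mod digit_sum 9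
        then c + 1 else c) c
    = c + pvTerm k L := by
  by_cases hL : 1 ≤ L
  · have key := PySem.List.foldl_count_if
      (fun ds => decide (k * ds < 10 * L ∧ PySem.Int.mod (k * ds) 9 = PySem.Int.mod ds 9))
      (PySem.List.pyRange 1 (9 * L + 1)) c
    simp only [decide_eq_true_eq] at key
    rw [key]
    congr 1
    have hcong : List.countP
        (fun ds => decide (k * ds < 10 * L ∧ PySem.Int.mod (k * ds) 9 = PySem.Int.mod ds 9))
        (PySem.List.pyRange 1 (9 * L + 1))
        = List.countP (fun s => decide (pvM k ∣ s ∧ s ≤ pvBound k L))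
            (PySem.List.pyRange 1 (9 * L + 1)) := by
      apply List.countP_congr
      intro s hs
      rw [PySem.List.mem_pyRange_one] at hs
      simp only [decide_eq_true_eq]
      exact pred_iff k L s hL hs.1 (by omega)
    rw [hcong, PySem.List.pyRange_one, show (9 * L + 1 - 1) = 9 * L by ring,
        count_mult (pvM k) (pvBound k L) (pvM_cases k)]
    have hbr := bound_range k L hL
    have h9L : ((9 * L).toNat : Int) = 9 * L := by omega
    rw [h9L]
    simp only [pvTerm, if_pos hL, PySem.Int.floordiv_eq_ediv_of_pos (pvM_pos k)]
    congr 1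
    omega
  · rw [PySem.List.pyRange_one_eq_nil (by omega : 9 * L + 1 ≤ 1)]
    simp [pvTerm, hL]

lemma outerA (k : Int) (xs : List Int) (c : Int) :
    xs.foldl
      (fun count length =>
        (PySem.List.pyRange 1 (9 * length + 1)).foldl
          (fun c digit_sum =>
            if k * digit_sum < 10 * length ∧
               PySem.Int.mod (k * digit_sum) 9 = PySem.Int.mod digit_sum 9
            then c + 1 else c) count) c
    = c + (xs.map (pvTerm k)).sum := by
  induction xs generalizing c with
  | nil => simp
  | cons L t ih =>
    simp only [List.foldl_cons, List.map_cons, List.sum_cons]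
    rw [inner_eq, ih]; ring

lemma outerB (k : Int) (xs : List Int) (c : Int) :
    xs.foldl
      (fun total length =>
        total + PySem.Int.floordiv
          (if k ≤ 0 then 9 * length
           else min (9 * length) (PySem.Int.floordiv (10 * length - 1) k)) (pvM k)) c
    = c + (xs.map (fun L => PySem.Int.floordiv (pvBound k L) (pvM k))).sum := by
  induction xs generalizing c with
  | nil => simp
  | cons L t ih =>
    simp only [List.foldl_cons, List.map_cons, List.sum_cons]
    rw [ih]
    simp only [pvBound]
    ring

lemma mapB_eq_term (k : Int) (xs : List Int) (hxs : ∀ L ∈ xs, 1 ≤ L) :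
    xs.map (fun L => PySem.Int.floordiv (pvBound k L) (pvM k)) = xs.map (pvTerm k) := by
  apply List.map_congr_left
  intro L hL
  simp only [pvTerm, if_pos (hxs L hL)]

lemma sums_eq (k l r : Int) :
    ((PySem.List.pyRange l (r + 1)).map (pvTerm k)).sum
      = ((PySem.List.pyRange (max l 1) (r + 1)).map (pvTerm k)).sum := by
  by_cases h : r + 1 ≤ l
  · rw [PySem.List.pyRange_one_eq_nil h,
        PySem.List.pyRange_one_eq_nil (le_trans h (le_max_left l 1))]
  · by_cases h2 : max l 1 ≤ r + 1
    swap
    · rw [PySem.List.pyRange_one_eq_nil (by omega : r + 1 ≤ max l 1)]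
      apply List.sum_eq_zero
      intro x hx
      simp only [List.mem_map] at hx
      obtain ⟨L, hL, rfl⟩ := hx
      rw [PySem.List.mem_pyRange_one] at hL
      have : ¬ (1 ≤ L) := by omega
      simp [pvTerm, this]
    · rw [PySem.List.pyRange_one_append l (max l 1) (r + 1) (le_max_left l 1) h2,
          List.map_append, List.sum_append]
      have hz : ((PySem.List.pyRange l (max l 1)).map (pvTerm k)).sum = 0 := by
        apply List.sum_eq_zero
        intro x hx
        simp only [List.mem_map] at hx
        obtain ⟨L, hL, rfl⟩ := hx
        rw [PySem.List.mem_pyRange_one] at hL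
        have : ¬ (1 ≤ L) := by omega
        simp [pvTerm, this]
      rw [hz, zero_add]

-- ===== VERDICT (by name: the statement is the Claim_ definition above) =====
theorem count_valid_numbers_spec : Claim_equal_count_valid_numbers := by
  intro l r k _
  show count_valid_numbers l r k = count_valid_numbers_alt l r k
  simp only [count_valid_numbers, count_valid_numbers_alt, pvM_eq]
  rw [outerA, outerB,
      mapB_eq_term k _ (by intro L hL; rw [PySem.List.mem_pyRange_one] at hL; omega),
      sums_eq]
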